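-- pv_equiv track=rewrite | github.com/dain7/algorithm | programmers/card_dummy.py | solution
-- ===== SOURCE A (Python) =====
-- def solution(cards1, cards2, goal):
--     one_list = [0]
--     two_list = [0]
--
--     for g in goal:
--         if g in cards1:
--             i = cards1.index(g)
--             if abs(one_list[-1]-i) > 1:
--                 return "No"
--             else :
--                 one_list.append(i)
--         if g in cards2:
--             i = cards2.index(g)
--             if abs(two_list[-1]-i) > 1:
--                 return "No"
--             else :
--                 two_list.append(i)
--     return "Yes"
-- ===== SOURCE B (Python) =====
-- def solution(cards1, cards2, goal):
--     def ok(cards):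
--         last = 0
--         for g in goal:
--             if g in cards:
--                 i = cards.index(g)
--                 if abs(last - i) > 1:
--                     return False
--                 last = i
--         return True
--     return "Yes" if ok(cards1) and ok(cards2) else "No"
-- ===== Notes on version B (the rewrite author's own statement) =====
-- stated objective: simpler
-- what changed: Replaces A's single interleaved loop that appends every matched index to two growing lists (of which only the last element is ever read) with a helper ok(cards) called once per pile, scanning goal while tracking just a scalar last index.
import Mathlib
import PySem

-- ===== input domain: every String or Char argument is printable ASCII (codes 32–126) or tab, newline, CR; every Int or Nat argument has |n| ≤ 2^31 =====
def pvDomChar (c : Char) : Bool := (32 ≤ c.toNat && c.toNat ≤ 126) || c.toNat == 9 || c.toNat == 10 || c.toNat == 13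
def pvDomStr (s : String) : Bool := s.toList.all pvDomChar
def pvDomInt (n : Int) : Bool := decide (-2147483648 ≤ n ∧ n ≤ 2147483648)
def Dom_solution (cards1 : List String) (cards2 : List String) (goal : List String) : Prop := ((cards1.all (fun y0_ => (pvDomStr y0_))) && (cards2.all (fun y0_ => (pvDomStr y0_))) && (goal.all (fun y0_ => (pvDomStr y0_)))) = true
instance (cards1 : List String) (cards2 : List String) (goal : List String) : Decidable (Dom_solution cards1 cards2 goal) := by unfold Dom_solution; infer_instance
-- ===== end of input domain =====

-- B replaces A's interleaved loop over two appended index lists with a helper checked once per pile, tracking a scalar last index (objective: simpler).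
-- ===== PORT A =====
-- the for-loop of A with early return; one/two are A's one_list/two_list
def solutionLoop (cards1 : List String) (cards2 : List String) (one : List Int) (two : List Int) : List String → String
  | [] => "Yes"
  | g :: gs =>
    if cards1.contains g then
      let i : Int := ((PySem.List.index? cards1 g).getD 0 : Nat)
      if 1 < (one.getLastD 0 - i).natAbs then "No"
      else
        if cards2.contains g then
          let j : Int := ((PySem.List.index? cards2 g).getD 0 : Nat)
          if 1 < (two.getLastD 0 - j).natAbs then "No"
          else solutionLoop cards1 cards2 (one ++ [i]) (two ++ [j]) gs
        else solutionLoop cards1 cards2 (one ++ [i]) two gs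
    else
      if cards2.contains g then
        let j : Int := ((PySem.List.index? cards2 g).getD 0 : Nat)
        if 1 < (two.getLastD 0 - j).natAbs then "No"
        else solutionLoop cards1 cards2 one (two ++ [j]) gs
      else solutionLoop cards1 cards2 one two gs

def solution (cards1 : List String) (cards2 : List String) (goal : List String) : String :=
  solutionLoop cards1 cards2 [0] [0] goal

-- ===== PORT B =====
-- B's helper ok(cards): scan goal with a scalar last matched index
def okPile (cards : List String) : Int → List String → Bool
  | _, [] => true
  | last, g :: gs =>
    if cards.contains g then
      let i : Int := ((PySem.List.index? cards g).getD 0 : Nat)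
      if 1 < (last - i).natAbs then false
      else okPile cards i gs
    else okPile cards last gs

def solution_alt (cards1 : List String) (cards2 : List String) (goal : List String) : String :=
  if okPile cards1 0 goal && okPile cards2 0 goal then "Yes" else "No"

-- ===== PRECONDITION & SPEC =====
def Spec_solution (cards1 : List String) (cards2 : List String) (goal : List String) (out : String) : Prop := out = solution_alt cards1 cards2 goal
instance (cards1 : List String) (cards2 : List String) (goal : List String) (out : String) : Decidable (Spec_solution cards1 cards2 goal out) := by unfold Spec_solution; infer_instance

-- ===== CLAIM (what is proved, stated in full; the proofs are below) =====
def Claim_equal_solution : Prop := ∀ (cards1 : List String) (cards2 : List String) (goal : List String), Dom_solution cards1 cards2 goal → Spec_solution cards1 cards2 goal (solution cards1 cards2 goal)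

-- ===== LEMMAS AND PROOFS =====
-- A's loop equals B's two independent scans started from the last elements of A's lists
lemma solutionLoop_eq (cards1 cards2 : List String) :
    ∀ (goal : List String) (one two : List Int),
      solutionLoop cards1 cards2 one two goal =
        (if okPile cards1 (one.getLastD 0) goal && okPile cards2 (two.getLastD 0) goal then "Yes" else "No") := by
  intro goal
  induction goal with
  | nil => intro one two; simp [solutionLoop, okPile]
  | cons g gs ih =>
    intro one two
    simp only [solutionLoop, okPile]
    by_cases h1 : cards1.contains g <;> by_cases h2 : cards2.contains g <;>
      simp only [h1, h2, if_true] <;>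
      split_ifs with hA hB hC <;>
      simp_all [ih, List.getLastD_concat]

-- ===== VERDICT (by name: the statement is the Claim_ definition above) =====
theorem solution_spec : Claim_equal_solution := by
  intro cards1 cards2 goal _
  unfold Spec_solution solution solution_alt
  rw [solutionLoop_eq]
  simp
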